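-- pv_equiv track=rewrite | github.com/ymseo741/mdtohwpx | md2hwpx/marko_adapter.py | _convert_raw_text
-- ===== SOURCE A (Python) =====
-- def _convert_raw_text(text: str) -> list:
--     """Convert raw text to Str and Space tokens."""
--     if not text:
--         return []
--
--     result = []
--     # Split by spaces but keep track of leading/trailing spaces
--     parts = text.split(' ')
--
--     for i, part in enumerate(parts):
--         if part:
--             result.append({"t": "Str", "c": part})
--         if i < len(parts) - 1:
--             result.append({"t": "Space"})
--
--     return result
-- ===== SOURCE B (Python) =====
-- def _convert_raw_text(text: str) -> list:
--     """Convert raw text to Str and Space tokens (single char-level pass)."""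
--     result = []
--     word = []
--     for ch in text:
--         if ch == ' ':
--             if word:
--                 result.append({"t": "Str", "c": ''.join(word)})
--                 word = []
--             result.append({"t": "Space"})
--         else:
--             word.append(ch)
--     if word:
--         result.append({"t": "Str", "c": ''.join(word)})
--     return result
-- ===== Notes on version B (the rewrite author's own statement) =====
-- stated objective: alternative
-- what changed: Replaced split(' ') plus enumerate-with-index/length bookkeeping by a single character-level pass with a word buffer that emits a Str token when a space or the end closes a word and a Space token per space.
import Mathlib
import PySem

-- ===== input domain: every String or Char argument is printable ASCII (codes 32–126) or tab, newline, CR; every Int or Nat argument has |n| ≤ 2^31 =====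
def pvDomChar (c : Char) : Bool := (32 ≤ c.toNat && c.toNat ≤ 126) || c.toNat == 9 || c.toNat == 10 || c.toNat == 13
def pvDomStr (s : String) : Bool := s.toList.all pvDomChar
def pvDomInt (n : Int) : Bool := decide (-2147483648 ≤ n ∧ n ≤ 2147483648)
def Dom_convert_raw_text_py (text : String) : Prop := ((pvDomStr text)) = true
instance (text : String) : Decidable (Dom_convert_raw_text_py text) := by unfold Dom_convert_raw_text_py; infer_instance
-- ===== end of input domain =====

-- B replaces split(' ')+enumerate by a single char-level pass with a word buffer (alternative decomposition, same cost).

-- ===== PORT A =====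
def convert_raw_text_py (text : String) : List (List (String × String)) :=
  if text.toList = [] then []
  else
    let parts : List String := (PySem.Chars.splitOn text.toList [' ']).map String.ofList
    (PySem.List.enumerate parts 0).foldl
      (fun result ip =>
        let result := if ip.2 ≠ "" then result ++ [[("t", "Str"), ("c", ip.2)]] else result
        if ip.1 < (parts.length : Int) - 1 then result ++ [[("t", "Space")]] else result)
      []

-- ===== PORT B =====
def convert_raw_text_py_alt (text : String) : List (List (String × String)) :=
  let st := text.toList.foldl
    (fun (st : List (List (String × String)) × List Char) ch =>
      if ch = ' ' then
        ((if st.2 ≠ [] then st.1 ++ [[("t", "Str"), ("c", String.ofList st.2)]] else st.1)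
           ++ [[("t", "Space")]], [])
      else (st.1, st.2 ++ [ch]))
    ([], [])
  if st.2 ≠ [] then st.1 ++ [[("t", "Str"), ("c", String.ofList st.2)]] else st.1

-- ===== PRECONDITION & SPEC =====
def Spec_convert_raw_text_py (text : String) (out : List (List (String × String))) : Prop := out = convert_raw_text_py_alt text
instance (text : String) (out : List (List (String × String))) : Decidable (Spec_convert_raw_text_py text out) := by unfold Spec_convert_raw_text_py; infer_instance

-- ===== CLAIM (what is proved, stated in full; the proofs are below) =====
def Claim_equal_convert_raw_text_py : Prop := ∀ (text : String), Dom_convert_raw_text_py text → Spec_convert_raw_text_py text (convert_raw_text_py text)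

-- ===== LEMMAS AND PROOFS =====

-- spec-side split on ' ' with an in-order current-word accumulator
def pvSplit : List Char → List Char → List (List Char)
  | [], cur => [cur]
  | c :: rest, cur => if c = ' ' then cur :: pvSplit rest [] else pvSplit rest (cur ++ [c])

lemma pvSplit_ne_nil (cs cur : List Char) : pvSplit cs cur ≠ [] := by
  induction cs generalizing cur with
  | nil => simp [pvSplit]
  | cons c rest ih => simp only [pvSplit]; split <;> simp [ih]

lemma splitOn_go_eq (fuel : Nat) (l cur : List Char) (acc2 : List (List Char))
    (h : l.length < fuel) :
    PySem.Chars.splitOn.go [' '] fuel l cur acc2 = acc2.reverse ++ pvSplit l cur.reverse := by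
  induction fuel generalizing l cur acc2 with
  | zero => omega
  | succ fuel ih =>
    cases l with
    | nil => simp [PySem.Chars.splitOn.go, pvSplit]
    | cons c rest =>
      simp only [PySem.Chars.splitOn.go]
      by_cases hc : c = ' '
      · subst hc
        have hp : [' '].isPrefixOf (' ' :: rest) = true := by simp [List.isPrefixOf]
        simp only [hp, if_pos]
        rw [show List.drop [' '].length (' ' :: rest) = rest from rfl]
        rw [ih rest [] (cur.reverse :: acc2) (by simpa using Nat.lt_of_succ_lt_succ h)]
        simp [pvSplit]
      · have hp : [' '].isPrefixOf (c :: rest) = false := by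
          simp [List.isPrefixOf]; exact fun h' => hc h'.symm
        simp only [hp, Bool.false_eq_true, if_neg, not_false_iff]
        rw [ih rest (c :: cur) acc2 (by simpa using Nat.lt_of_succ_lt_succ h)]
        simp [pvSplit, hc]

lemma splitOn_eq (cs : List Char) :
    PySem.Chars.splitOn cs [' '] = pvSplit cs [] := by
  unfold PySem.Chars.splitOn
  rw [splitOn_go_eq (cs.length + 1) cs [] [] (by omega)]
  simp

-- per-part token
def pvTok (p : List Char) : List (List (String × String)) :=
  if p ≠ [] then [[("t", "Str"), ("c", String.ofList p)]] else []

-- output of A's loop on a part list (Space between consecutive parts)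
def pvOut : List (List Char) → List (List (String × String))
  | [] => []
  | [p] => pvTok p
  | p :: q :: ps => pvTok p ++ [("t", "Space")] :: pvOut (q :: ps)

lemma ofList_ne_empty_iff (w : List Char) : (String.ofList w ≠ "") ↔ w ≠ [] := by
  constructor
  · intro h hw; exact h (by simp [hw])
  · intro h he
    have : (String.ofList w).toList = ("" : String).toList := by rw [he]
    simp at this; exact h this

lemma foldA_eq (n : Int) (qs : List (List Char)) (s : Int)
    (acc : List (List (String × String))) (hn : s + qs.length = n) :
    (PySem.List.enumerate (List.map String.ofList qs) s).foldl
      (fun result ip =>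
        if ip.1 < n - 1 then
          (if ip.2 ≠ "" then result ++ [[("t", "Str"), ("c", ip.2)]] else result)
            ++ [[("t", "Space")]]
        else if ip.2 ≠ "" then result ++ [[("t", "Str"), ("c", ip.2)]] else result)
      acc = acc ++ pvOut qs := by
  induction qs generalizing s acc with
  | nil => simp [PySem.List.enumerate_nil, pvOut]
  | cons p ps ih =>
    simp only [List.map_cons, PySem.List.enumerate_cons, List.foldl_cons]
    cases ps with
    | nil =>
      have hs : ¬ ((s : Int) < n - 1) := by simp at hn; omega
      simp only [hs, if_neg, not_false_iff, List.map_nil, PySem.List.enumerate_nil,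
        List.foldl_nil, ofList_ne_empty_iff]
      simp only [pvOut, pvTok]
      split <;> simp
    | cons q ps' =>
      have hs : (s : Int) < n - 1 := by
        simp only [List.length_cons] at hn; push_cast at hn; omega
      simp only [hs, if_pos, ofList_ne_empty_iff]
      rw [ih (s + 1) _ (by simp only [List.length_cons] at hn ⊢; push_cast at hn ⊢; omega)]
      simp only [pvOut, pvTok]
      split <;> simp

lemma foldB_eq (cs : List Char) (res : List (List (String × String))) (word : List Char) :
    (if (cs.foldl
        (fun (st : List (List (String × String)) × List Char) ch =>
          if ch = ' ' then
            ((if st.2 ≠ [] then st.1 ++ [[("t", "Str"), ("c", String.ofList st.2)]] else st.1)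
               ++ [[("t", "Space")]], [])
          else (st.1, st.2 ++ [ch])) (res, word)).2 ≠ [] then
      (cs.foldl
        (fun (st : List (List (String × String)) × List Char) ch =>
          if ch = ' ' then
            ((if st.2 ≠ [] then st.1 ++ [[("t", "Str"), ("c", String.ofList st.2)]] else st.1)
               ++ [[("t", "Space")]], [])
          else (st.1, st.2 ++ [ch])) (res, word)).1
        ++ [[("t", "Str"), ("c", String.ofList ((cs.foldl
        (fun (st : List (List (String × String)) × List Char) ch =>
          if ch = ' ' then
            ((if st.2 ≠ [] then st.1 ++ [[("t", "Str"), ("c", String.ofList st.2)]] else st.1)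
               ++ [[("t", "Space")]], [])
          else (st.1, st.2 ++ [ch])) (res, word)).2))]]
     else
      (cs.foldl
        (fun (st : List (List (String × String)) × List Char) ch =>
          if ch = ' ' then
            ((if st.2 ≠ [] then st.1 ++ [[("t", "Str"), ("c", String.ofList st.2)]] else st.1)
               ++ [[("t", "Space")]], [])
          else (st.1, st.2 ++ [ch])) (res, word)).1)
      = res ++ pvOut (pvSplit cs word) := by
  induction cs generalizing res word with
  | nil =>
    simp only [List.foldl_nil, pvSplit, pvOut, pvTok]
    split <;> simp
  | cons c rest ih =>
    simp only [List.foldl_cons]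
    by_cases hc : c = ' '
    · subst hc
      simp only [reduceIte]
      rw [ih]
      rw [show pvSplit (' ' :: rest) word = word :: pvSplit rest [] from by simp [pvSplit]]
      have hne := pvSplit_ne_nil rest ([] : List Char)
      cases h : pvSplit rest [] with
      | nil => exact absurd h hne
      | cons r rs =>
        simp only [pvOut, pvTok]
        by_cases hw : word = [] <;> simp [hw]
    · simp only [if_neg hc]
      rw [ih]
      simp [pvSplit, hc]

-- ===== VERDICT (by name: the statement is the Claim_ definition above) =====
theorem convert_raw_text_py_spec : Claim_equal_convert_raw_text_py := by
  intro text _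
  unfold Spec_convert_raw_text_py convert_raw_text_py convert_raw_text_py_alt
  by_cases h : text.toList = []
  · simp [h]
  · simp only [h, if_neg, not_false_iff]
    rw [splitOn_eq]
    rw [foldA_eq ((List.map String.ofList (pvSplit text.toList [])).length : Int)
      (pvSplit text.toList []) 0 [] (by simp)]
    rw [foldB_eq text.toList [] []]
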